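-- pv_equiv track=rewrite | github.com/SOFIAGYRYKOVYCH/lab_alghoritms | lab2/2.6/user.py | bsearch_rightmost
-- ===== SOURCE A (Python) =====
-- def bsearch_rightmost(array, x):
--     low = 0
--     t  = True
--     high = len(array) - 1
--     if x > array[-1]  :
--         return -1
--     if array[0] == array[-1] :
--         return high
--     while low <= high :
--         mid = (high + low) // 2
--         h = array[mid]
--         if h == x :
--             while True :
--                 if not h == array[-1] and h == array[mid+1] :
--                     mid+=1
--                 else :
--                     return mid
--         elif h > x :
--             high = mid - 1
--
--         else :
--             low = mid + 1
--
--     return high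
-- ===== SOURCE B (Python) =====
-- def bsearch_rightmost(array, x):
--     if x > array[-1]:
--         return -1
--     # bisect_right by hand, then step back one: the result is the rightmost
--     # index holding x if present, else the rightmost index holding a value < x.
--     lo, hi = 0, len(array)
--     while lo < hi:
--         mid = (lo + hi) // 2
--         if array[mid] <= x:
--             lo = mid + 1
--         else:
--             hi = mid
--     return lo - 1
-- ===== Notes on version B (the rewrite author's own statement) =====
-- stated objective: alternative
-- what changed: Replaced A's equality-probing binary search plus linear rightward scan over duplicates (and its constant-array shortcut) by a single bisect_right-style binary search on <=, returning lo-1.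
-- intended difference: On sorted constant arrays with x below the common value A returns len(array)-1 as if x were found while B returns -1, and when x equals the last element and occurs there at least twice A returns the first binary-search probe that hits x (an inner occurrence) while B returns the rightmost occurrence len(array)-1; B's values are the intended 'rightmost index' semantics. — e.g. on bsearch_rightmost([1, 2, 2], 2): A returns 1, B returns 2
-- outside the precondition, e.g. on bsearch_rightmost([2, 0, 0], 0): A returns 1, B returns 2; on bsearch_rightmost([], 0): A raises IndexError, B raises IndexError
import Mathlib
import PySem

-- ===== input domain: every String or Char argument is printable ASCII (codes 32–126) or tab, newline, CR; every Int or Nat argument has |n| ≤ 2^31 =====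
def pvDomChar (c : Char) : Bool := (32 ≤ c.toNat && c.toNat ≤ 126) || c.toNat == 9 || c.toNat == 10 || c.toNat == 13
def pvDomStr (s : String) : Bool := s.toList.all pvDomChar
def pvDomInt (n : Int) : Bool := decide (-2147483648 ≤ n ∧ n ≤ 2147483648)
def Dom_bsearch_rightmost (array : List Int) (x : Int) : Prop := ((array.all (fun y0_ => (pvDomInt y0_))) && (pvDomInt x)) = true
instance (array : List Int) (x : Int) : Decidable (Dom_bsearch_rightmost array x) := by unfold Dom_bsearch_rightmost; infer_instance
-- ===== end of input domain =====

-- B replaces A's equality-probing binary search + linear duplicate scan by a single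
-- bisect_right-style binary search; A's wrong answers on two corner regions (constant
-- arrays with x below them; duplicated maximum equal to x) are stated as an intended
-- difference D_.


-- ===== PORT A =====
-- inner `while True` loop of A: advance mid while h is not the last element and array[mid+1] == h
-- (fuel only makes the recursion structural; the call site passes array.length + 1, which is never exhausted)
def pvAInner (array : List Int) (last h : Int) (mid : Int) : Nat → Int
  | 0 => mid
  | fuel + 1 =>
    if ¬ h = last ∧ PySem.List.pyGet? array (mid + 1) = some h then
      pvAInner array last h (mid + 1) fuel
    else mid

-- outer `while low <= high` loop of A (fuel only makes the recursion structural;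
-- the call site passes array.length + 1 ≥ the interval length, never exhausted)
def pvALoop (array : List Int) (last x : Int) (low high : Int) : Nat → Int
  | 0 => high
  | fuel + 1 =>
    if low ≤ high then
      let mid := PySem.Int.floordiv (high + low) 2
      match PySem.List.pyGet? array mid with
      | none => 0  -- array[mid] would raise IndexError; unreachable under Pre_
      | some h =>
        if h = x then pvAInner array last h mid (array.length + 1)
        else if h > x then pvALoop array last x low (mid - 1) fuel
        else pvALoop array last x (mid + 1) high fuel
    else high

def bsearch_rightmost (array : List Int) (x : Int) : Int :=
  let high : Int := (array.length : Int) - 1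
  match PySem.List.pyGet? array (-1) with
  | none => 0  -- array[-1] raises IndexError on the empty list; excluded by Pre_
  | some last =>
    if x > last then -1
    else
      match PySem.List.pyGet? array 0 with
      | none => 0
      | some first =>
        if first = last then high
        else pvALoop array last x 0 high (array.length + 1)

-- ===== PORT B =====
-- hand-written bisect_right loop of Source B
def pvBLoop (array : List Int) (x : Int) (lo hi : Int) : Nat → Int
  | 0 => lo
  | fuel + 1 =>
    if lo < hi then
      let mid := PySem.Int.floordiv (lo + hi) 2
      match PySem.List.pyGet? array mid with
      | none => 0  -- unreachable: 0 ≤ lo ≤ mid < hi ≤ len at every call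
      | some v =>
        if v ≤ x then pvBLoop array x (mid + 1) hi fuel
        else pvBLoop array x lo mid fuel
    else lo

def bsearch_rightmost_alt (array : List Int) (x : Int) : Int :=
  match PySem.List.pyGet? array (-1) with
  | none => 0  -- array[-1] raises IndexError on the empty list; excluded by Pre_
  | some last =>
    if x > last then -1
    else pvBLoop array x 0 (array.length : Int) (array.length + 1) - 1

-- ===== PRECONDITION & SPEC =====
-- comparison class of v against x: below / equal / above
def pvCls (x v : Int) : Int := if v < x then 0 else if v = x then 1 else 2
-- the list is partitioned with respect to x: every element < x precedes every
-- element = x, which precedes every element > x (true of every sorted list)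
def pvPart (array : List Int) (x : Int) : Prop :=
  array.Pairwise (fun u v => pvCls x u ≤ pvCls x v)
-- Pre_ excludes the empty list, on which A raises IndexError, and arrays not
-- partitioned with respect to x, on which a binary search's answer is an accident
-- of its probe order.
def Pre_bsearch_rightmost (array : List Int) (x : Int) : Prop :=
  array ≠ [] ∧ pvPart array x
instance (array : List Int) (x : Int) : Decidable (Pre_bsearch_rightmost array x) := by
  unfold Pre_bsearch_rightmost pvPart; infer_instance

def pvWitness_bsearch_rightmost : List Int × Int := ([0, 1], 1)

-- On sorted constant arrays with x below the common value A returns len(array)-1 as if x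
-- were found while B returns -1, and when x equals the last element and also occupies the
-- second-to-last slot A returns the first binary-search probe hitting x (an inner
-- occurrence) while B returns the rightmost occurrence len(array)-1; B's values are the
-- intended "rightmost index" semantics.
def D_bsearch_rightmost (array : List Int) (x : Int) : Prop :=
  array ≠ [] ∧
    ((array.head?.getD 0 = array.getLast?.getD 0 ∧ x < array.head?.getD 0) ∨
     (array.head?.getD 0 ≠ array.getLast?.getD 0 ∧ array.getLast?.getD 0 = x ∧
        array[array.length - 2]? = some x))
instance (array : List Int) (x : Int) : Decidable (D_bsearch_rightmost array x) := by
  unfold D_bsearch_rightmost; infer_instance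

def Spec_bsearch_rightmost (array : List Int) (x : Int) (out : Int) : Prop :=
  ¬ D_bsearch_rightmost array x → out = bsearch_rightmost_alt array x
instance (array : List Int) (x : Int) (out : Int) : Decidable (Spec_bsearch_rightmost array x out) := by
  unfold Spec_bsearch_rightmost; infer_instance

def pvDiffWitness_bsearch_rightmost : List Int × Int := ([1, 2, 2], 2)
def pvDiffWitnessOut_bsearch_rightmost : Int × Int := (1, 2)

-- ===== CLAIM (what is proved, stated in full; the proofs are below) =====
def Claim_unchanged_bsearch_rightmost : Prop := ∀ (array : List Int) (x : Int), Dom_bsearch_rightmost array x → Pre_bsearch_rightmost array x → Spec_bsearch_rightmost array x (bsearch_rightmost array x)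
def Claim_changed_bsearch_rightmost : Prop := Dom_bsearch_rightmost (pvDiffWitness_bsearch_rightmost.1) (pvDiffWitness_bsearch_rightmost.2) ∧ Pre_bsearch_rightmost (pvDiffWitness_bsearch_rightmost.1) (pvDiffWitness_bsearch_rightmost.2) ∧ D_bsearch_rightmost (pvDiffWitness_bsearch_rightmost.1) (pvDiffWitness_bsearch_rightmost.2) ∧ bsearch_rightmost (pvDiffWitness_bsearch_rightmost.1) (pvDiffWitness_bsearch_rightmost.2) = pvDiffWitnessOut_bsearch_rightmost.1 ∧ bsearch_rightmost_alt (pvDiffWitness_bsearch_rightmost.1) (pvDiffWitness_bsearch_rightmost.2) = pvDiffWitnessOut_bsearch_rightmost.2 ∧ pvDiffWitnessOut_bsearch_rightmost.1 ≠ pvDiffWitnessOut_bsearch_rightmost.2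
def Claim_exact_bsearch_rightmost : Prop := ∀ (array : List Int) (x : Int), Dom_bsearch_rightmost array x → Pre_bsearch_rightmost array x → D_bsearch_rightmost array x → bsearch_rightmost array x ≠ bsearch_rightmost_alt array x

-- ===== LEMMAS AND PROOFS =====

theorem sorted_countP_char (R : Int → Int → Prop) (p : Int → Bool)
    (hp : ∀ u v : Int, R u v → p v = true → p u = true) :
    ∀ (a : List Int), a.Pairwise R →
      ∀ i (h : i < a.length), (p a[i] = true ↔ i < a.countP p) := by
  intro a
  induction a with
  | nil => intro _ i h; simp at h
  | cons y ys ih =>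
    intro hs i hi
    rw [List.pairwise_cons] at hs
    obtain ⟨hy, hs'⟩ := hs
    rw [List.countP_cons]
    cases i with
    | zero =>
      simp only [List.getElem_cons_zero]
      constructor
      · intro hpy; simp [hpy]
      · intro hpos
        by_contra hnpy
        have hz : ys.countP p = 0 := by
          rw [List.countP_eq_zero]
          intro z hzm hpz
          exact hnpy (hp y z (hy z hzm) hpz)
        rw [hz] at hpos
        simp [hnpy] at hpos
    | succ j =>
      simp only [List.getElem_cons_succ]
      have hj : j < ys.length := by simpa using hi
      rw [ih hs' j hj]
      by_cases hpy : p y = true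
      · simp only [hpy, if_pos]
        omega
      · have hz : ys.countP p = 0 := by
          rw [List.countP_eq_zero]
          intro z hzm hpz
          exact hpy (hp y z (hy z hzm) hpz)
        simp [hz, hpy]

theorem pvBLoop_eq (a : List Int) (x : Int) (hs : pvPart a x) :
    ∀ fuel (lo hi : Int), (hi - lo).toNat ≤ fuel → 0 ≤ lo →
      lo ≤ (a.countP (fun v => decide (v ≤ x)) : Int) →
      (a.countP (fun v => decide (v ≤ x)) : Int) ≤ hi → hi ≤ (a.length : Int) →
      pvBLoop a x lo hi fuel = (a.countP (fun v => decide (v ≤ x)) : Int) := by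
  intro fuel
  induction fuel with
  | zero =>
    intro lo hi hm h0 hlok hkhi hhil
    rw [pvBLoop]
    omega
  | succ n ihn =>
    intro lo hi hm h0 hlok hkhi hhil
    rw [pvBLoop]
    by_cases hlh : lo < hi
    · rw [if_pos hlh]
      have hb := PySem.Int.floordiv_two_mid_bounds (le_of_lt hlh)
      have hmidlt : PySem.Int.floordiv (lo + hi) 2 < hi := by
        rw [PySem.Int.floordiv_lt_iff_lt_mul (by omega)]
        omega
      set mid := PySem.Int.floordiv (lo + hi) 2 with hmid
      have hrange : 0 ≤ mid ∧ mid < (a.length : Int) := by omega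
      have hget := PySem.List.pyGet?_eq_some_getElem a hrange.1 hrange.2
      simp only [hget]
      have hchar := sorted_countP_char (fun u v => pvCls x u ≤ pvCls x v) (fun v => decide (v ≤ x))
        (by intro u v huv hpv; simp at hpv ⊢; unfold pvCls at huv; split_ifs at huv <;> omega)
        a hs mid.toNat (by omega)
      by_cases hle : a[mid.toNat] ≤ x
      · rw [if_pos hle]
        have : (mid.toNat : Int) < (a.countP (fun v => decide (v ≤ x)) : Int) := by
          have := (hchar.mp (by simpa using hle))
          omega
        exact ihn (mid + 1) hi (by omega) (by omega) (by omega) hkhi hhil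
      · rw [if_neg hle]
        have : ¬ ((mid.toNat : Int) < (a.countP (fun v => decide (v ≤ x)) : Int)) := by
          intro hc
          exact hle (by simpa using hchar.mpr (by omega))
        exact ihn lo mid (by omega) h0 hlok (by omega) (by omega)
    · rw [if_neg hlh]
      omega


theorem char_le (a : List Int) (x : Int) (hs : pvPart a x) (i : Nat) (h : i < a.length) :
    a[i] ≤ x ↔ i < a.countP (fun v => decide (v ≤ x)) := by
  have := sorted_countP_char (fun u v => pvCls x u ≤ pvCls x v) (fun v => decide (v ≤ x))
    (by intro u v huv hpv; simp at hpv ⊢; unfold pvCls at huv; split_ifs at huv <;> omega)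
    a hs i h
  simpa using this

theorem char_lt (a : List Int) (x : Int) (hs : pvPart a x) (i : Nat) (h : i < a.length) :
    a[i] < x ↔ i < a.countP (fun v => decide (v < x)) := by
  have := sorted_countP_char (fun u v => pvCls x u ≤ pvCls x v) (fun v => decide (v < x))
    (by intro u v huv hpv; simp at hpv ⊢; unfold pvCls at huv; split_ifs at huv <;> omega)
    a hs i h
  simpa using this

theorem c_le_k (a : List Int) (x : Int) :
    a.countP (fun v => decide (v < x)) ≤ a.countP (fun v => decide (v ≤ x)) := by
  apply List.countP_mono_left
  intro v _ hv
  simp at hv ⊢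
  omega

-- inner scan of A, called with h = x ≠ last: returns (count of elements ≤ x) - 1
theorem pvAInner_eq (a : List Int) (last x : Int) (hs : pvPart a x)
    (hxlast : x ≠ last)
    (hklen : (a.countP (fun v => decide (v ≤ x)) : Int) ≤ (a.length : Int) - 1) :
    ∀ fuel (mid : Int), 0 ≤ mid →
      mid < (a.countP (fun v => decide (v ≤ x)) : Int) →
      (a.countP (fun v => decide (v < x)) : Int) ≤ mid + 1 →
      ((a.countP (fun v => decide (v ≤ x)) : Int) - 1 - mid).toNat ≤ fuel →
      pvAInner a last x mid fuel = (a.countP (fun v => decide (v ≤ x)) : Int) - 1 := by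
  intro fuel
  induction fuel with
  | zero =>
    intro mid h0 hmk hc hm
    rw [pvAInner]
    omega
  | succ n ihn =>
    intro mid h0 hmk hc hm
    rw [pvAInner]
    have hrange : 0 ≤ mid + 1 ∧ mid + 1 < (a.length : Int) ∨ mid + 1 = (a.countP (fun v => decide (v ≤ x)) : Int) := by omega
    by_cases hend : mid + 1 < (a.countP (fun v => decide (v ≤ x)) : Int)
    · -- next slot still holds x: advance
      have hlt : mid + 1 < (a.length : Int) := by omega
      have hget := PySem.List.pyGet?_eq_some_getElem a (i := mid + 1) (by omega) hlt
      have hle : a[(mid+1).toNat] ≤ x := (char_le a x hs _ (by omega)).mpr (by omega)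
      have hge : ¬ a[(mid+1).toNat] < x := by
        intro hcon
        have := (char_lt a x hs _ (by omega)).mp hcon
        omega
      have heq : PySem.List.pyGet? a (mid + 1) = some x := by
        rw [hget]
        congr 1
        omega
      rw [if_pos ⟨hxlast, heq⟩]
      exact ihn (mid + 1) (by omega) hend (by omega) (by omega)
    · -- next slot is past the run of x: stop with mid = k - 1
      have hmk1 : mid + 1 = (a.countP (fun v => decide (v ≤ x)) : Int) := by omega
      have hlt : mid + 1 < (a.length : Int) := by omega
      have hget := PySem.List.pyGet?_eq_some_getElem a (i := mid + 1) (by omega) hlt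
      have hgt : ¬ a[(mid+1).toNat] ≤ x := by
        intro hcon
        have := (char_le a x hs _ (by omega)).mp hcon
        omega
      have hne : ¬ PySem.List.pyGet? a (mid + 1) = some x := by
        rw [hget]
        intro hcon
        exact hgt (by simp at hcon; omega)
      rw [if_neg (by rintro ⟨-, hcon⟩; exact hne hcon)]
      omega

-- outer loop of A: under the sorted invariants it returns (count of elements ≤ x) - 1
theorem pvALoop_eq (a : List Int) (last x : Int) (hs : pvPart a x)
    (hne : a ≠ []) (hlast : a.getLast hne = last) (hxle : x ≤ last)
    (hb : x = last → (a.countP (fun v => decide (v < x)) : Int) = (a.length : Int) - 1) :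
    ∀ fuel (low high : Int), (high + 1 - low).toNat ≤ fuel → 0 ≤ low →
      high ≤ (a.length : Int) - 1 →
      low ≤ (a.countP (fun v => decide (v < x)) : Int) →
      (a.countP (fun v => decide (v ≤ x)) : Int) ≤ high + 1 →
      pvALoop a last x low high fuel = (a.countP (fun v => decide (v ≤ x)) : Int) - 1 := by
  intro fuel
  have hck := c_le_k a x
  induction fuel with
  | zero =>
    intro low high hm h0 hh hlc hkh
    rw [pvALoop]
    omega
  | succ n ihn =>
    intro low high hm h0 hh hlc hkh
    rw [pvALoop]
    by_cases hlh : low ≤ high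
    · rw [if_pos hlh]
      have hbnd : low ≤ PySem.Int.floordiv (low + high) 2 ∧ PySem.Int.floordiv (low + high) 2 ≤ high :=
        PySem.Int.floordiv_two_mid_bounds hlh
      have hcomm : PySem.Int.floordiv (high + low) 2 = PySem.Int.floordiv (low + high) 2 := by
        rw [Int.add_comm]
      set mid := PySem.Int.floordiv (high + low) 2 with hmiddef
      have hmb : low ≤ mid ∧ mid ≤ high := by omega
      have hlen1 : 1 ≤ (a.length : Int) := by
        have : a.length ≠ 0 := by simpa using hne
        omega
      have hget := PySem.List.pyGet?_eq_some_getElem a (i := mid) (by omega) (by omega)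
      simp only [hget]
      have hlastget : a[a.length - 1]'(by omega) = last := by
        rw [← hlast, List.getLast_eq_getElem]
      by_cases hx : a[mid.toNat] = x
      · rw [if_pos hx]
        have hmk : mid < (a.countP (fun v => decide (v ≤ x)) : Int) := by
          have := (char_le a x hs mid.toNat (by omega)).mp (by rw [hx])
          omega
        have hmc : (a.countP (fun v => decide (v < x)) : Int) ≤ mid := by
          by_contra hcon
          have := (char_lt a x hs mid.toNat (by omega)).mpr (by omega)
          omega
        by_cases hxl : x = last
        · -- x is the maximum; ¬D guarantees a unique occurrence, at the last index
          have hc := hb hxl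
          have hmidv : mid = (a.length : Int) - 1 := by omega
          rw [hx, pvAInner, if_neg (by rintro ⟨hcon, -⟩; exact hcon hxl)]
          omega
        · -- x < last so the run of x ends before the last index
          have hklen : (a.countP (fun v => decide (v ≤ x)) : Int) ≤ (a.length : Int) - 1 := by
            by_contra hcon
            have := (char_le a x hs (a.length - 1) (by omega)).mpr (by omega)
            omega
          rw [hx]
          exact pvAInner_eq a last x hs hxl hklen (a.length + 1) mid (by omega) hmk (by omega) (by omega)
      · rw [if_neg hx]
        by_cases hgt : a[mid.toNat] > x
        · rw [if_pos hgt]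
          have hmk : (a.countP (fun v => decide (v ≤ x)) : Int) ≤ mid := by
            by_contra hcon
            have := (char_le a x hs mid.toNat (by omega)).mpr (by omega)
            omega
          exact ihn low (mid - 1) (by omega) h0 (by omega) hlc (by omega)
        · rw [if_neg hgt]
          have hmc : (mid.toNat : Int) < (a.countP (fun v => decide (v < x)) : Int) := by
            have := (char_lt a x hs mid.toNat (by omega)).mp (by omega)
            omega
          exact ihn (mid + 1) high (by omega) (by omega) hh (by omega) hkh
    · rw [if_neg hlh]
      omega

theorem headD_eq (a : List Int) (hne : a ≠ []) : a.head?.getD 0 = a[0]'(by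
    have : a.length ≠ 0 := by simpa using hne
    omega) := by
  cases a with
  | nil => exact absurd rfl hne
  | cons y t => rfl

theorem getLastD_eq (a : List Int) (hne : a ≠ []) : a.getLast?.getD 0 = a.getLast hne := by
  rw [List.getLast?_eq_some_getLast hne]
  rfl

theorem pyGetNeg1 (a : List Int) (hne : a ≠ []) :
    PySem.List.pyGet? a (-1) = some (a.getLast hne) := by
  rw [PySem.List.pyGet?_neg_one, List.getLast?_eq_some_getLast hne]

-- B's value on sorted nonempty input with x ≤ max: (count of elements ≤ x) - 1
theorem alt_eq (a : List Int) (x : Int) (hs : pvPart a x) (hne : a ≠ [])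
    (hxle : x ≤ a.getLast hne) :
    bsearch_rightmost_alt a x = (a.countP (fun v => decide (v ≤ x)) : Int) - 1 := by
  unfold bsearch_rightmost_alt
  simp only [pyGetNeg1 a hne]
  rw [if_neg (by omega)]
  have hkl : a.countP (fun v => decide (v ≤ x)) ≤ a.length := List.countP_le_length
  rw [pvBLoop_eq a x hs (a.length + 1) 0 (a.length : Int) (by omega) le_rfl (by omega)
      (by omega) le_rfl]

-- when x equals the maximum of a sorted nonempty list, every element is ≤ x
theorem k_eq_len (a : List Int) (x : Int) (hs : pvPart a x) (hne : a ≠ [])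
    (hxl : a.getLast hne = x) : a.countP (fun v => decide (v ≤ x)) = a.length := by
  have hlen1 : 1 ≤ a.length := by
    have : a.length ≠ 0 := by simpa using hne
    omega
  have hlastget : a[a.length - 1]'(by omega) = x := by
    rw [← hxl, List.getLast_eq_getElem]
  have := (char_le a x hs (a.length - 1) (by omega)).mp (by omega)
  have hkl : a.countP (fun v => decide (v ≤ x)) ≤ a.length := List.countP_le_length
  omega

-- A's outer loop never reaches the last index when x = last has an earlier duplicate
theorem pvALoop_lt (a : List Int) (last x : Int) (hs : pvPart a x)
    (hne : a ≠ []) (hlast : a.getLast hne = last) (hxl : x = last)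
    (hdup : (a.countP (fun v => decide (v < x)) : Int) ≤ (a.length : Int) - 2) :
    ∀ fuel (low : Int), 0 ≤ low → low ≤ (a.countP (fun v => decide (v < x)) : Int) →
      ((a.length : Int) - low).toNat ≤ fuel →
      pvALoop a last x low ((a.length : Int) - 1) fuel ≤ (a.length : Int) - 2 := by
  intro fuel
  induction fuel with
  | zero =>
    intro low h0 hlc hm
    omega
  | succ n ihn =>
    intro low h0 hlc hm
    rw [pvALoop]
    rw [if_pos (by omega)]
    have hbnd := PySem.Int.floordiv_two_mid_bounds (show low ≤ (a.length : Int) - 1 by omega)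
    have hcomm : PySem.Int.floordiv ((a.length : Int) - 1 + low) 2
        = PySem.Int.floordiv (low + ((a.length : Int) - 1)) 2 := by rw [Int.add_comm]
    set mid := PySem.Int.floordiv ((a.length : Int) - 1 + low) 2 with hmiddef
    have hmidlt : mid < (a.length : Int) - 1 := by
      rw [hmiddef, PySem.Int.floordiv_lt_iff_lt_mul (by omega)]
      omega
    have hmb : low ≤ mid := by omega
    have hget := PySem.List.pyGet?_eq_some_getElem a (i := mid) (by omega) (by omega)
    simp only [hget]
    have hlastget : a[a.length - 1]'(by omega) = last := by
      rw [← hlast, List.getLast_eq_getElem]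
    by_cases hx : a[mid.toNat] = x
    · rw [if_pos hx, hx, pvAInner, if_neg (by rintro ⟨hcon, -⟩; exact hcon hxl)]
      omega
    · rw [if_neg hx]
      by_cases hgt : a[mid.toNat] > x
      · exfalso
        have hk1 := (char_le a x hs (a.length - 1) (by omega)).mp (by omega)
        have hk2 : ¬ (mid.toNat < a.countP (fun v => decide (v ≤ x))) := by
          intro hcon
          have := (char_le a x hs mid.toNat (by omega)).mpr hcon
          omega
        omega
      · rw [if_neg hgt]
        have hmc : mid < (a.countP (fun v => decide (v < x)) : Int) := by
          have := (char_lt a x hs mid.toNat (by omega)).mp (by omega)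
          omega
        exact ihn (mid + 1) (by omega) (by omega) (by omega)

-- ===== VERDICT (by name: the statement is the Claim_ definition above) =====
theorem bsearch_rightmost_spec : Claim_unchanged_bsearch_rightmost := by
  intro a x hdom hpre hnD
  obtain ⟨hne, hs⟩ := hpre
  unfold D_bsearch_rightmost at hnD
  have hOr : ¬ ((a.head?.getD 0 = a.getLast?.getD 0 ∧ x < a.head?.getD 0) ∨
      (a.head?.getD 0 ≠ a.getLast?.getD 0 ∧ a.getLast?.getD 0 = x ∧
        a[a.length - 2]? = some x)) := fun h => hnD ⟨hne, h⟩
  have hlen1 : 1 ≤ (a.length : Int) := by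
    have : a.length ≠ 0 := by simpa using hne
    omega
  set last := a.getLast hne with hlastdef
  have hlastget : a[a.length - 1]'(by omega) = last := by
    rw [hlastdef, List.getLast_eq_getElem]
  have hheadD := headD_eq a hne
  have hlastD := getLastD_eq a hne
  show bsearch_rightmost a x = bsearch_rightmost_alt a x
  by_cases hgt : x > last
  · unfold bsearch_rightmost bsearch_rightmost_alt
    simp only [pyGetNeg1 a hne]
    rw [if_pos hgt, if_pos hgt]
  · rw [alt_eq a x hs hne (by omega)]
    unfold bsearch_rightmost
    simp only [pyGetNeg1 a hne]
    rw [if_neg hgt]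
    have hget0 := PySem.List.pyGet?_eq_some_getElem a (i := 0) (by omega) (by omega)
    simp only [hget0]
    by_cases hfl : a[(0 : Int).toNat] = last
    · rw [if_pos hfl]
      have hxeq : last = x := by
        by_contra hcon
        exact hOr (Or.inl ⟨by rw [hheadD, hlastD]; exact hfl, by rw [hheadD]; simp at hfl ⊢; omega⟩)
      rw [k_eq_len a x hs hne hxeq]
    · rw [if_neg hfl]
      have hb : x = last → (a.countP (fun v => decide (v < x)) : Int) = (a.length : Int) - 1 := by
        intro hxl
        have hlen2 : 2 ≤ a.length := by
          by_contra hcon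
          have h1 : a.length = 1 := by omega
          have h0 : a[(0 : Int).toNat]'(by omega) = a[a.length - 1]'(by omega) := by
            congr 1
            omega
          rw [hlastget] at h0
          exact hfl h0
        have hne2 : ¬ (a[a.length - 2]? = some x) := by
          intro hcon
          exact hOr (Or.inr ⟨by rw [hheadD, hlastD]; simpa using hfl, by rw [hlastD]; omega, hcon⟩)
        rw [List.getElem?_eq_getElem (by omega)] at hne2
        have hnx : a[a.length - 2]'(by omega) ≠ x := fun h => hne2 (by rw [h])
        have hk1 := (char_le a x hs (a.length - 1) (by omega)).mp (by omega)
        have hlt2 : a[a.length - 2]'(by omega) < x := by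
          by_contra hcon
          have hgt2 : ¬ a[a.length - 2]'(by omega) ≤ x := by omega
          have : ¬ (a.length - 2 < a.countP (fun v => decide (v ≤ x))) := by
            intro hcon2
            exact hgt2 ((char_le a x hs (a.length - 2) (by omega)).mpr hcon2)
          omega
        have hc1 := (char_lt a x hs (a.length - 2) (by omega)).mp hlt2
        have hc2 : ¬ (a.length - 1 < a.countP (fun v => decide (v < x))) := by
          intro hcon
          have := (char_lt a x hs (a.length - 1) (by omega)).mpr hcon
          omega
        omega
      have hkl : a.countP (fun v => decide (v ≤ x)) ≤ a.length := List.countP_le_length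
      exact pvALoop_eq a last x hs hne rfl (by omega) hb (a.length + 1) 0 ((a.length : Int) - 1)
        (by omega) le_rfl le_rfl (by omega) (by omega)
theorem bsearch_rightmost_changed : Claim_changed_bsearch_rightmost := by
  unfold Claim_changed_bsearch_rightmost; decide
theorem bsearch_rightmost_tight : Claim_exact_bsearch_rightmost := by
  intro a x hdom hpre hD
  obtain ⟨hne, hs⟩ := hpre
  unfold D_bsearch_rightmost at hD
  obtain ⟨-, hcases⟩ := hD
  have hlen1 : 1 ≤ (a.length : Int) := by
    have : a.length ≠ 0 := by simpa using hne
    omega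
  set last := a.getLast hne with hlastdef
  have hlastget : a[a.length - 1]'(by omega) = last := by
    rw [hlastdef, List.getLast_eq_getElem]
  have hheadD := headD_eq a hne
  have hlastD := getLastD_eq a hne
  rw [hheadD, hlastD] at hcases
  have hget0 := PySem.List.pyGet?_eq_some_getElem a (i := 0) (by omega) (by omega)
  rcases hcases with ⟨hfl, hxlt⟩ | ⟨hfl, hxeq, hdup⟩
  · -- constant array, x below it: A = len-1, B = -1
    have hfl' : a[0]'(by omega) = last := by rw [hlastdef]; exact hfl
    have hgt : ¬ x > last := by omega
    have hk0 : a.countP (fun v => decide (v ≤ x)) = 0 := by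
      by_contra hcon
      have := (char_le a x hs 0 (by omega)).mpr (by omega)
      omega
    rw [alt_eq a x hs hne (by omega), hk0]
    unfold bsearch_rightmost
    simp only [pyGetNeg1 a hne]
    rw [if_neg hgt]
    simp only [hget0]
    rw [if_pos (by simpa using hfl)]
    omega
  · -- duplicated maximum equal to x: A stops at an inner occurrence, B at the last index
    have hxl : x = last := by omega
    have hgt : ¬ x > last := by omega
    rw [alt_eq a x hs hne (by omega), k_eq_len a x hs hne (by omega)]
    unfold bsearch_rightmost
    simp only [pyGetNeg1 a hne]
    rw [if_neg hgt]
    simp only [hget0]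
    rw [if_neg (by simpa using hfl)]
    have hlen2 : 2 ≤ a.length := by
      by_contra hcon
      have h1 : a.length = 1 := by omega
      have h0 : a[0]'(by omega) = a[a.length - 1]'(by omega) := by
        congr 1
        omega
      rw [hlastget, hlastdef] at h0
      exact hfl h0
    rw [List.getElem?_eq_getElem (by omega)] at hdup
    have hdx : a[a.length - 2]'(by omega) = x := by
      have := hdup
      simpa using this
    have hdupc : (a.countP (fun v => decide (v < x)) : Int) ≤ (a.length : Int) - 2 := by
      have : ¬ (a.length - 2 < a.countP (fun v => decide (v < x))) := by
        intro hcon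
        have := (char_lt a x hs (a.length - 2) (by omega)).mpr hcon
        omega
      omega
    have hA : pvALoop a (a.getLast hne) x 0 ((a.length : Int) - 1) (a.length + 1)
        ≤ (a.length : Int) - 2 :=
      pvALoop_lt a last x hs hne rfl hxl hdupc (a.length + 1) 0 le_rfl (by omega) (by omega)
    omega
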